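-- pv_equiv track=rewrite | github.com/brian-hearn/reconfiguration | main.py | find_partitions_within_steps
-- ===== SOURCE A (Python) =====
-- from collections import deque
--
-- def normalize_partition(parts):
--     # Sort parts by their smallest element to have canonical form
--     sorted_parts = [tuple(sorted(p)) for p in parts]
--     sorted_parts.sort(key=lambda x: x[0] if x else -1)
--     return tuple(sorted_parts)
--
-- def find_neighbour_partitions(n, adj, partition, vertices_to_move):
--     parts = [set(p) for p in partition]
--     neighbours = set()
--     for v in vertices_to_move:
--         # Find which part v belongs to
--         idx_v = next(i for i, p in enumerate(parts) if v in p)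
--         # Try moving v to other parts without neighbours of v
--         for i, p in enumerate(parts):
--             if i == idx_v:
--                 continue
--             if all(neigh not in p for neigh in adj[v]):
--                 new_parts = [set(x) for x in parts]
--                 new_parts[idx_v].remove(v)
--                 new_parts[i].add(v)
--                 # Remove empty parts
--                 new_parts = [p for p in new_parts if p]
--                 neighbours.add(normalize_partition(new_parts))
--         # Also consider putting v alone if current part size > 1
--         if len(parts[idx_v]) > 1:
--             new_parts = [set(x) for x in parts]
--             new_parts[idx_v].remove(v)
--             new_parts.append({v})
--             neighbours.add(normalize_partition(new_parts))
--     return neighbours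
--
-- def find_partitions_within_steps(n, adj, start_partition, vertices_to_move, steps):
--     visited = {start_partition: 0}
--     queue = deque([start_partition])
--
--     while queue:
--         current = queue.popleft()
--         depth = visited[current]
--         if depth == steps:
--             continue
--         new_partitions = find_neighbour_partitions(n, adj, current, vertices_to_move)
--         for p in new_partitions:
--             if p not in visited:
--                 visited[p] = depth + 1
--                 queue.append(p)
--     return set(visited.keys()), visited
-- ===== SOURCE B (Python) =====
-- def normalize_partition(parts):
--     # Sort parts by their smallest element to have canonical form
--     sorted_parts = [tuple(sorted(p)) for p in parts]
--     sorted_parts.sort(key=lambda x: x[0] if x else -1)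
--     return tuple(sorted_parts)
--
-- def find_neighbour_partitions(n, adj, partition, vertices_to_move):
--     parts = [set(p) for p in partition]
--     neighbours = set()
--     for v in vertices_to_move:
--         # Find which part v belongs to
--         idx_v = next(i for i, p in enumerate(parts) if v in p)
--         # Try moving v to other parts without neighbours of v
--         for i, p in enumerate(parts):
--             if i == idx_v:
--                 continue
--             if all(neigh not in p for neigh in adj[v]):
--                 new_parts = [set(x) for x in parts]
--                 new_parts[idx_v].remove(v)
--                 new_parts[i].add(v)
--                 # Remove empty parts
--                 new_parts = [p for p in new_parts if p]
--                 neighbours.add(normalize_partition(new_parts))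
--         # Also consider putting v alone if current part size > 1
--         if len(parts[idx_v]) > 1:
--             new_parts = [set(x) for x in parts]
--             new_parts[idx_v].remove(v)
--             new_parts.append({v})
--             neighbours.add(normalize_partition(new_parts))
--     return neighbours
--
-- def find_partitions_within_steps(n, adj, start_partition, vertices_to_move, steps):
--     # Naive (round-based) closure: no queue and no frontier; each round rescans and
--     # re-expands EVERY partition seen so far and stops when a round adds nothing new.
--     visited = {start_partition: 0}
--     depth = 0
--     while depth != steps:
--         depth += 1
--         grew = False
--         for part in list(visited):
--             for p in find_neighbour_partitions(n, adj, part, vertices_to_move):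
--                 if p not in visited:
--                     visited[p] = depth
--                     grew = True
--         if not grew:
--             break
--     return set(visited.keys()), visited
-- ===== Notes on version B (the rewrite author's own statement) =====
-- stated objective: alternative
-- what changed: The deque BFS (pop one node, look up its stored depth, expand its neighbours) is replaced by a naive round-based closure with no queue or frontier at all: each round rescans and re-expands every partition seen so far, tagging anything new with the round number, and stops when a round adds nothing; already-closed partitions contribute nothing, so the visited dict grows in exactly the same order with the same depths.
import Mathlib
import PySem

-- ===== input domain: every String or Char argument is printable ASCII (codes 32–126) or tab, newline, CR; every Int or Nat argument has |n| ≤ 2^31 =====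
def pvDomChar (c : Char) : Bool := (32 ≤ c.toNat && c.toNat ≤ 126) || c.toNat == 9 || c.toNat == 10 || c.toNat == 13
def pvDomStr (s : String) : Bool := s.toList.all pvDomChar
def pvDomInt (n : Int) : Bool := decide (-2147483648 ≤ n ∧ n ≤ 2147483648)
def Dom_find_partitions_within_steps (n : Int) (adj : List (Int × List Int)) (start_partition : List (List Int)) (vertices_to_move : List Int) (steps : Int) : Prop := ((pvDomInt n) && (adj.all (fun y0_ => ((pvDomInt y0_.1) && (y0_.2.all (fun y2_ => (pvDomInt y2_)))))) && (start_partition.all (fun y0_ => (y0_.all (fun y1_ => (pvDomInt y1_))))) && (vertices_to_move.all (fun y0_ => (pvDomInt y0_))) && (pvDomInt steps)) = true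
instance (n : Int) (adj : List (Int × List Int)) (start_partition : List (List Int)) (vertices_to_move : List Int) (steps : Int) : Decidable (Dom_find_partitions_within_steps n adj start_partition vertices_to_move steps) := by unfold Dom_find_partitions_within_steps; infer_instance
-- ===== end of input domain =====

-- ===== PORT A =====
-- B replaces A's deque BFS by a naive round-based closure (no queue, no frontier: every round
-- re-expands everything seen so far and stops when nothing new appears); the neighbour helpers are shared.
-- pv_aLoop and pv_bLoop carry a fuel argument (pv_fuel, a provable upper bound on the number of queue
-- pops / rounds) purely to make the Python loops total; the proofs show it never runs out.

def pv_sortKey (x : List Int) : Int := match x with | [] => -1 | h :: _ => h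

def normalize_partition (parts : List (List Int)) : List (List Int) :=
  PySem.List.sorted (parts.map (fun p => PySem.List.sorted p (fun y => y))) pv_sortKey

-- the body of "for i, p in enumerate(parts): …" (the move-v-to-part-i branch)
def pv_nbMove (adjv : List Int) (parts : List (PySem.Set Int)) (v : Int) (idx_v : Nat)
    (nb : PySem.Set (List (List Int))) (ip : Int × PySem.Set Int) : PySem.Set (List (List Int)) :=
  if ip.1 == (idx_v : Int) then nb
  else if adjv.all (fun neigh => !(PySem.Set.contains ip.2 neigh)) then
    let np0 := parts.set idx_v (PySem.Set.discard (parts.getD idx_v []) v)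
    let np1 := np0.set ip.1.toNat (PySem.Set.add (np0.getD ip.1.toNat []) v)
    PySem.Set.add nb (normalize_partition (np1.filter (fun q => !q.isEmpty)))
  else nb

-- the body of "for v in vertices_to_move: …"
def pv_nbV (adj : List (Int × List Int)) (parts : List (PySem.Set Int)) (neighbours : PySem.Set (List (List Int))) (v : Int) : PySem.Set (List (List Int)) :=
  match parts.findIdx? (fun p => PySem.Set.contains p v) with
  | none => neighbours      -- Python raises StopIteration here; such inputs lie outside Pre_
  | some idx_v =>
    let adjv : List Int := ((PySem.Dict.mk adj).get? v).getD []   -- Python adj[v]; KeyError lies outside Pre_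
    let nb1 := (PySem.List.enumerate parts).foldl (pv_nbMove adjv parts v idx_v) neighbours
    if 1 < PySem.Set.len (parts.getD idx_v []) then
      PySem.Set.add nb1 (normalize_partition ((parts.set idx_v (PySem.Set.discard (parts.getD idx_v []) v)) ++ [[v]]))
    else nb1

def find_neighbour_partitions (n : Int) (adj : List (Int × List Int)) (partition : List (List Int)) (vertices_to_move : List Int) : PySem.Set (List (List Int)) :=
  let parts : List (PySem.Set Int) := partition.map (fun p => PySem.Set.ofList p)
  vertices_to_move.foldl (pv_nbV adj parts) []

def pv_S (start_partition : List (List Int)) : List Int := PySem.Set.ofList start_partition.flatten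
def pv_E (K : List (List Int)) : Nat := ((K.map (fun p => PySem.Set.ofList p)).filter (fun q => q.isEmpty)).length
def pv_T (K : List (List Int)) : Nat := ((K.map (fun p => PySem.Set.ofList p)).map List.length).sum
def pv_c2 (start_partition : List (List Int)) : Nat := ((pv_S start_partition).length + 1) ^ (pv_S start_partition).length
def pv_U (start_partition : List (List Int)) : Nat := (pv_c2 start_partition + 1) ^ (pv_E start_partition + pv_T start_partition)
def pv_fuel (start_partition : List (List Int)) : Nat := pv_U start_partition + 2

-- the inner loop body of A: "if p not in visited: visited[p] = dep; queue.append(p)"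
def pvF (dep : Int) (st : PySem.Dict (List (List Int)) Int × List (List (List Int))) (p : List (List Int)) : PySem.Dict (List (List Int)) Int × List (List (List Int)) :=
  if st.1.contains p then st else (st.1.insert p dep, st.2 ++ [p])

def pv_aLoop (n : Int) (adj : List (Int × List Int)) (vtm : List Int) (steps : Int) : Nat → PySem.Dict (List (List Int)) Int → List (List (List Int)) → PySem.Dict (List (List Int)) Int
  | 0, visited, _ => visited
  | _ + 1, visited, [] => visited
  | f + 1, visited, current :: rest =>
    let depth := visited.getD current 0
    if depth == steps then pv_aLoop n adj vtm steps f visited rest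
    else
      let st := (find_neighbour_partitions n adj current vtm).foldl (pvF (depth + 1)) (visited, rest)
      pv_aLoop n adj vtm steps f st.1 st.2

def find_partitions_within_steps (n : Int) (adj : List (Int × List Int)) (start_partition : List (List Int)) (vertices_to_move : List Int) (steps : Int) : List (List (List Int)) × (List (List (List Int) × Int)) :=
  let visited := pv_aLoop n adj vertices_to_move steps (pv_fuel start_partition) (PySem.Dict.mk [(start_partition, (0 : Int))]) [start_partition]
  (PySem.Set.ofList visited.keys, visited.items)

-- ===== PORT B =====
-- the inner loop body of B: "if p not in visited: visited[p] = depth; grew = True"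
def pvG (dep : Int) (st : PySem.Dict (List (List Int)) Int × Bool) (p : List (List Int)) : PySem.Dict (List (List Int)) Int × Bool :=
  if st.1.contains p then st else (st.1.insert p dep, true)

-- "for p in find_neighbour_partitions(n, adj, part, vertices_to_move): …"
def pvBStep (n : Int) (adj : List (Int × List Int)) (vtm : List Int) (dep : Int) (st : PySem.Dict (List (List Int)) Int × Bool) (part : List (List Int)) : PySem.Dict (List (List Int)) Int × Bool :=
  (find_neighbour_partitions n adj part vtm).foldl (pvG dep) st

-- one round: "grew = False; for part in list(visited): …"
def pv_bRound (n : Int) (adj : List (Int × List Int)) (vtm : List Int) (dep : Int) (visited : PySem.Dict (List (List Int)) Int) : PySem.Dict (List (List Int)) Int × Bool :=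
  visited.keys.foldl (pvBStep n adj vtm dep) (visited, false)

-- "while depth != steps: depth += 1; <round>; if not grew: break"
def pv_bLoop (n : Int) (adj : List (Int × List Int)) (vtm : List Int) (steps : Int) : Nat → Int → PySem.Dict (List (List Int)) Int → PySem.Dict (List (List Int)) Int
  | 0, _, visited => visited
  | f + 1, depth, visited =>
    if depth == steps then visited
    else
      let st := pv_bRound n adj vtm (depth + 1) visited
      if st.2 then pv_bLoop n adj vtm steps f (depth + 1) st.1 else st.1

def find_partitions_within_steps_alt (n : Int) (adj : List (Int × List Int)) (start_partition : List (List Int)) (vertices_to_move : List Int) (steps : Int) : List (List (List Int)) × (List (List (List Int) × Int)) :=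
  let visited := pv_bLoop n adj vertices_to_move steps (pv_fuel start_partition) 0 (PySem.Dict.mk [(start_partition, (0 : Int))])
  (PySem.Set.ofList visited.keys, visited.items)

-- ===== PRECONDITION & SPEC =====
-- Pre_ excludes exactly the inputs on which A raises: whenever any expansion happens at all (steps ≠ 0 and
-- vertices_to_move nonempty), a vertex of vertices_to_move absent from the start partition raises StopIteration,
-- and one absent from adj raises KeyError as soon as a multi-part partition gets expanded — which happens exactly
-- when the start has ≥ 2 parts, or some part with ≥ 2 distinct vertices can be split and the resulting 2-part
-- partition is itself expanded (2 ≤ steps, or steps < 0 where the BFS never hits its depth cap).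
def Pre_find_partitions_within_steps (n : Int) (adj : List (Int × List Int)) (start_partition : List (List Int)) (vertices_to_move : List Int) (steps : Int) : Prop :=
  steps = 0 ∨ vertices_to_move = [] ∨
  ((∀ v ∈ vertices_to_move, v ∈ start_partition.flatten) ∧
   ((2 ≤ start_partition.length ∨ ((2 ≤ steps ∨ steps < 0) ∧ ∃ p ∈ start_partition, 2 ≤ (PySem.Set.ofList p).length)) →
     ∀ v ∈ vertices_to_move, (PySem.Dict.mk adj).contains v = true))
instance (n : Int) (adj : List (Int × List Int)) (start_partition : List (List Int)) (vertices_to_move : List Int) (steps : Int) : Decidable (Pre_find_partitions_within_steps n adj start_partition vertices_to_move steps) := by unfold Pre_find_partitions_within_steps; infer_instance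
def pvWitness_find_partitions_within_steps : Int × (List (Int × List Int)) × List (List Int) × List Int × Int := (2, [(0, [1]), (1, [0])], [[0], [1]], [0], 2)
def Spec_find_partitions_within_steps (n : Int) (adj : List (Int × List Int)) (start_partition : List (List Int)) (vertices_to_move : List Int) (steps : Int) (out : List (List (List Int)) × (List (List (List Int) × Int))) : Prop := out = find_partitions_within_steps_alt n adj start_partition vertices_to_move steps
instance (n : Int) (adj : List (Int × List Int)) (start_partition : List (List Int)) (vertices_to_move : List Int) (steps : Int) (out : List (List (List Int)) × (List (List (List Int) × Int))) : Decidable (Spec_find_partitions_within_steps n adj start_partition vertices_to_move steps out) := by unfold Spec_find_partitions_within_steps; infer_instance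

-- ===== CLAIM (what is proved, stated in full; the proofs are below) =====
def Claim_equal_find_partitions_within_steps : Prop := ∀ (n : Int) (adj : List (Int × List Int)) (start_partition : List (List Int)) (vertices_to_move : List Int) (steps : Int), Dom_find_partitions_within_steps n adj start_partition vertices_to_move steps → Pre_find_partitions_within_steps n adj start_partition vertices_to_move steps → Spec_find_partitions_within_steps n adj start_partition vertices_to_move steps (find_partitions_within_steps n adj start_partition vertices_to_move steps)

-- ===== LEMMAS AND PROOFS =====

-- ---- proof-only helpers: A's per-level expansion, used to relate the two loops ----

def pvStep (n : Int) (adj : List (Int × List Int)) (vtm : List Int) (dep : Int) (st : PySem.Dict (List (List Int)) Int × List (List (List Int))) (part : List (List Int)) : PySem.Dict (List (List Int)) Int × List (List (List Int)) :=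
  (find_neighbour_partitions n adj part vtm).foldl (pvF dep) st

def pv_bLevel (n : Int) (adj : List (Int × List Int)) (vtm : List Int) (dep : Int) (visited : PySem.Dict (List (List Int)) Int) (frontier : List (List (List Int))) : PySem.Dict (List (List Int)) Int × List (List (List Int)) :=
  frontier.foldl (pvStep n adj vtm dep) (visited, [])

-- ---- generic small helpers ----

lemma pv_len_le_of_nodup_lt (l : List Nat) (d : Nat) (hn : l.Nodup) (hlt : ∀ x ∈ l, x < d) : l.length ≤ d := by
  have h1 : l.toFinset.card = l.length := List.toFinset_card_of_nodup hn
  have h2 : l.toFinset ⊆ Finset.range d := by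
    intro x hx; simp only [List.mem_toFinset] at hx; simpa using hlt x hx
  have := Finset.card_le_card h2
  simpa [h1] using this

lemma pvPairwiseLt (l : List Int) (h1 : l.Pairwise (· ≤ ·)) (h2 : l.Nodup) : l.Pairwise (· < ·) := by
  have := List.Pairwise.and h1 h2
  exact this.imp (fun h => lt_of_le_of_ne h.1 h.2)

lemma pvDiscardLen {α : Type} [BEq α] [LawfulBEq α] (l : List α) (v : α) (hn : l.Nodup) (hm : v ∈ l) :
    (PySem.Set.discard l v).length + 1 = l.length := by
  have hf : l.filter (fun y => !y == v) = l.erase v := Eq.symm (List.Nodup.erase_eq_filter hn v)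
  unfold PySem.Set.discard
  rw [hf]
  have h1 := List.length_erase_of_mem hm
  have h2 := List.length_pos_of_mem hm
  omega

lemma pvFindIdx {β : Type} (p : List β → Bool) (l : List (List β)) (i : Nat) (h : l.findIdx? p = some i) :
    i < l.length ∧ p (l.getD i []) = true := by
  obtain ⟨hi, hp, -⟩ := List.findIdx?_eq_some_iff_getElem.1 h
  refine ⟨hi, ?_⟩
  rwa [List.getD_eq_getElem l [] hi]

lemma pvGetDElem {β : Type} (l : List (List β)) (i : Nat) (hi : i < l.length) : l.getD i [] = l[i] :=
  List.getD_eq_getElem l [] hi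

lemma pvSetMapSum (f : List Int → Nat) (l : List (List Int)) (i : Nat) (x : List Int) (hi : i < l.length) :
    ((l.set i x).map f).sum + f (l.getD i []) = (l.map f).sum + f x := by
  induction l generalizing i with
  | nil => simp at hi
  | cons a as ih =>
    cases i with
    | zero => simp [List.set]; ring
    | succ j =>
      simp only [List.set, List.map_cons, List.sum_cons, List.getD_cons_succ]
      have := ih j (by simpa using hi)
      omega

lemma pvSizeKeys {κ ν : Type} [BEq κ] (d : PySem.Dict κ ν) : d.size = d.keys.length := by
  simp [PySem.Dict.size, PySem.Dict.keys]

-- ---- encoding and counting ----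

def pvEnc (c : Nat) : List Nat → Nat
  | [] => 0
  | x :: xs => x + 1 + (c + 1) * pvEnc c xs

lemma pvEnc_lt (c : Nat) (l : List Nat) (h : ∀ x ∈ l, x < c) : pvEnc c l < (c + 1) ^ l.length := by
  induction l with
  | nil => simp [pvEnc]
  | cons x xs ih =>
    have hx : x < c := h x (by simp)
    have hxs := ih (fun y hy => h y (by simp [hy]))
    simp only [pvEnc, List.length_cons, pow_succ]
    nlinarith

lemma pvEnc_inj (c : Nat) (l1 : List Nat) : ∀ (l2 : List Nat), (∀ x ∈ l1, x < c) → (∀ x ∈ l2, x < c) →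
    pvEnc c l1 = pvEnc c l2 → l1 = l2 := by
  induction l1 with
  | nil =>
    intro l2 _ _ he
    cases l2 with
    | nil => rfl
    | cons y ys => exfalso; simp only [pvEnc] at he; omega
  | cons x xs ih =>
    intro l2 h1 h2 he
    cases l2 with
    | nil => exfalso; simp only [pvEnc] at he; omega
    | cons y ys =>
      simp only [pvEnc] at he
      have hx : x < c := h1 x (by simp)
      have hy : y < c := h2 y (by simp)
      have hmod : (x + 1 + (c+1) * pvEnc c xs) % (c+1) = x + 1 := by
        rw [Nat.add_mul_mod_self_left]; exact Nat.mod_eq_of_lt (by omega)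
      have hmod2 : (y + 1 + (c+1) * pvEnc c ys) % (c+1) = y + 1 := by
        rw [Nat.add_mul_mod_self_left]; exact Nat.mod_eq_of_lt (by omega)
      have hx1 : x = y := by rw [he] at hmod; rw [hmod2] at hmod; omega
      subst hx1
      have htl : pvEnc c xs = pvEnc c ys := by
        have : (c+1) * pvEnc c xs = (c+1) * pvEnc c ys := by omega
        exact Nat.eq_of_mul_eq_mul_left (by omega) this
      rw [ih ys (fun z hz => h1 z (by simp [hz])) (fun z hz => h2 z (by simp [hz])) htl]

def pvIdx (start : List (List Int)) (x : Int) : Nat := (pv_S start).idxOf x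
def pvPC (start : List (List Int)) (part : List Int) : Nat := pvEnc (pv_S start).length (part.map (pvIdx start))
def pvKC (start : List (List Int)) (K : List (List Int)) : Nat := pvEnc (pv_c2 start) (K.map (pvPC start))

def pvGood (start : List (List Int)) (K : List (List Int)) : Prop :=
  (∀ x ∈ K.flatten, x ∈ pv_S start) ∧ pv_E K ≤ pv_E start ∧ pv_T K ≤ pv_T start
def pvNKey (start : List (List Int)) (K : List (List Int)) : Prop :=
  (∀ part ∈ K, List.Pairwise (· < ·) part) ∧ pvGood start K
def pvInv (start : List (List Int)) (v : PySem.Dict (List (List Int)) Int) : Prop :=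
  v.keys.Nodup ∧ ∀ k ∈ v.keys, k = start ∨ pvNKey start k

lemma pvMapInjList {α β : Type} (P : α → Prop) (f : α → β)
    (hinj : ∀ x y, P x → P y → f x = f y → x = y) :
    ∀ (l1 l2 : List α), (∀ x ∈ l1, P x) → (∀ x ∈ l2, P x) → l1.map f = l2.map f → l1 = l2 := by
  intro l1
  induction l1 with
  | nil => intro l2 _ _ he; cases l2 with
    | nil => rfl
    | cons y ys => simp at he
  | cons x xs ih =>
    intro l2 h1 h2 he
    cases l2 with
    | nil => simp at he
    | cons y ys =>
      simp only [List.map_cons, List.cons.injEq] at he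
      have hx : x = y := hinj x y (h1 x (by simp)) (h2 y (by simp)) he.1
      rw [hx, ih ys (fun z hz => h1 z (by simp [hz])) (fun z hz => h2 z (by simp [hz])) he.2]

lemma pvK_len (K : List (List Int)) : K.length ≤ pv_E K + pv_T K := by
  induction K with
  | nil => simp [pv_E, pv_T]
  | cons p ps ih =>
    unfold pv_E pv_T at ih ⊢
    simp only [List.map_cons, List.filter_cons, List.sum_cons]
    split_ifs with h
    · simp only [List.length_cons]
      omega
    · have hne : PySem.Set.ofList p ≠ [] := by intro hq; simp [hq] at h
      have hp := List.length_pos_iff.2 hne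
      simp only [List.length_cons]
      omega

lemma pvPC_lt (start : List (List Int)) (part : List Int) (hs : List.Pairwise (· < ·) part)
    (hm : ∀ x ∈ part, x ∈ pv_S start) : pvPC start part < pv_c2 start := by
  have hdig : ∀ y ∈ part.map (pvIdx start), y < (pv_S start).length := by
    intro y hy
    obtain ⟨x, hx, rfl⟩ := List.mem_map.1 hy
    exact List.idxOf_lt_length_of_mem (hm x hx)
  have h1 := pvEnc_lt (pv_S start).length (part.map (pvIdx start)) hdig
  have hnd : (part.map (pvIdx start)).Nodup := by
    refine List.Nodup.map_on ?_ (List.Pairwise.imp ne_of_lt hs)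
    intro x hx y hy he
    exact (List.idxOf_inj (hm x hx)).1 he
  have hlen : (part.map (pvIdx start)).length ≤ (pv_S start).length :=
    pv_len_le_of_nodup_lt _ _ hnd hdig
  have h2 : ((pv_S start).length + 1) ^ (part.map (pvIdx start)).length ≤ pv_c2 start := by
    unfold pv_c2
    exact Nat.pow_le_pow_right (by omega) hlen
  unfold pvPC
  omega

lemma pvPC_inj (start : List (List Int)) (p1 p2 : List Int)
    (hs1 : List.Pairwise (· < ·) p1) (hm1 : ∀ x ∈ p1, x ∈ pv_S start)
    (hs2 : List.Pairwise (· < ·) p2) (hm2 : ∀ x ∈ p2, x ∈ pv_S start)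
    (he : pvPC start p1 = pvPC start p2) : p1 = p2 := by
  have hdig : ∀ (p : List Int), (∀ x ∈ p, x ∈ pv_S start) → ∀ y ∈ p.map (pvIdx start), y < (pv_S start).length := by
    intro p hp y hy
    obtain ⟨x, hx, rfl⟩ := List.mem_map.1 hy
    exact List.idxOf_lt_length_of_mem (hp x hx)
  have hmaps : p1.map (pvIdx start) = p2.map (pvIdx start) :=
    pvEnc_inj _ _ _ (hdig p1 hm1) (hdig p2 hm2) he
  refine pvMapInjList (fun x => x ∈ pv_S start) (pvIdx start) ?_ p1 p2 hm1 hm2 hmaps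
  intro x y hx hy hxy
  exact (List.idxOf_inj hx).1 hxy

lemma pvNKey_part_mem (start K : List (List Int)) (h : pvNKey start K) :
    ∀ part ∈ K, ∀ x ∈ part, x ∈ pv_S start := by
  intro part hp x hx
  exact h.2.1 x (List.mem_flatten.2 ⟨part, hp, hx⟩)

lemma pvKC_lt (start K : List (List Int)) (h : pvNKey start K) : pvKC start K < pv_U start := by
  have hdig : ∀ y ∈ K.map (pvPC start), y < pv_c2 start := by
    intro y hy
    obtain ⟨part, hp, rfl⟩ := List.mem_map.1 hy
    exact pvPC_lt start part (h.1 part hp) (pvNKey_part_mem start K h part hp)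
  have h1 := pvEnc_lt (pv_c2 start) (K.map (pvPC start)) hdig
  have hlen : (K.map (pvPC start)).length ≤ pv_E start + pv_T start := by
    simp only [List.length_map]
    exact le_trans (pvK_len K) (Nat.add_le_add h.2.2.1 h.2.2.2)
  have h2 : (pv_c2 start + 1) ^ (K.map (pvPC start)).length ≤ pv_U start := by
    unfold pv_U
    exact Nat.pow_le_pow_right (by omega) hlen
  unfold pvKC
  omega

lemma pvKC_inj (start K1 K2 : List (List Int)) (h1 : pvNKey start K1) (h2 : pvNKey start K2)
    (he : pvKC start K1 = pvKC start K2) : K1 = K2 := by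
  have hdig : ∀ (K : List (List Int)), pvNKey start K → ∀ y ∈ K.map (pvPC start), y < pv_c2 start := by
    intro K h y hy
    obtain ⟨part, hp, rfl⟩ := List.mem_map.1 hy
    exact pvPC_lt start part (h.1 part hp) (pvNKey_part_mem start K h part hp)
  have hmaps : K1.map (pvPC start) = K2.map (pvPC start) :=
    pvEnc_inj _ _ _ (hdig K1 h1) (hdig K2 h2) he
  refine pvMapInjList
    (fun part => List.Pairwise (· < ·) part ∧ ∀ x ∈ part, x ∈ pv_S start) (pvPC start) ?_ K1 K2 ?_ ?_ hmaps
  · intro x y hx hy hxy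
    exact pvPC_inj start x y hx.1 hx.2 hy.1 hy.2 hxy
  · intro part hp; exact ⟨h1.1 part hp, pvNKey_part_mem start K1 h1 part hp⟩
  · intro part hp; exact ⟨h2.1 part hp, pvNKey_part_mem start K2 h2 part hp⟩

lemma pvSize_le (start : List (List Int)) (v : PySem.Dict (List (List Int)) Int) (h : pvInv start v) :
    v.size ≤ pv_U start + 1 := by
  rw [pvSizeKeys]
  have hlen : (v.keys.map (fun k => if k = start then pv_U start else pvKC start k)).length ≤ pv_U start + 1 := by
    apply pv_len_le_of_nodup_lt
    · refine List.Nodup.map_on ?_ h.1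
      intro k1 hk1 k2 hk2 he
      by_cases e1 : k1 = start <;> by_cases e2 : k2 = start <;> simp only [e1, e2, if_pos, if_neg, if_true] at he
      · rw [e1, e2]
      · rcases h.2 k2 hk2 with h' | h'
        · exact absurd h' e2
        · exact absurd he.symm (Nat.ne_of_lt (pvKC_lt start k2 h'))
      · rcases h.2 k1 hk1 with h' | h'
        · exact absurd h' e1
        · exact absurd he (Nat.ne_of_lt (pvKC_lt start k1 h'))
      · rcases h.2 k1 hk1 with h1' | h1'
        · exact absurd h1' e1
        rcases h.2 k2 hk2 with h2' | h2'
        · exact absurd h2' e2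
        exact pvKC_inj start k1 k2 h1' h2' he
    · intro y hy
      obtain ⟨k, hk, rfl⟩ := List.mem_map.1 hy
      by_cases e : k = start
      · simp [e]
      · simp only [e, if_neg, if_false]
        rcases h.2 k hk with h' | h'
        · exact absurd h' e
        · have := pvKC_lt start k h'
          omega
  simpa using hlen

-- ---- neighbours are well-formed ----

lemma pvFoldPreserveMem {α β : Type} [BEq β] (P : β → Prop) (l0 : List α) (G : PySem.Set β → α → PySem.Set β)
    (hstep : ∀ s a, a ∈ l0 → (∀ q ∈ s, P q) → ∀ q ∈ G s a, P q) :
    ∀ (l : List α), (∀ a ∈ l, a ∈ l0) → ∀ (s : PySem.Set β), (∀ q ∈ s, P q) → ∀ q ∈ l.foldl G s, P q := by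
  intro l
  induction l with
  | nil => intro _ s hs q hq; exact hs q hq
  | cons a tl ih =>
    intro hmem s hs q hq
    simp only [List.foldl_cons] at hq
    exact ih (fun b hb => hmem b (List.mem_cons_of_mem _ hb)) (G s a)
      (hstep s a (hmem a (by simp)) hs) q hq

lemma pvFilterLenSum (l : List (List Int)) :
    (l.filter (fun q => q.isEmpty)).length = (l.map (fun q => if q.isEmpty then (1 : Nat) else 0)).sum := by
  induction l with
  | nil => rfl
  | cons p tl ih =>
    simp only [List.filter_cons, List.map_cons, List.sum_cons]
    by_cases hp : p.isEmpty <;> simp [hp, ih] <;> omega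

lemma pvNormalize_NKey (start : List (List Int)) (X : List (List Int))
    (hnd : ∀ p ∈ X, p.Nodup)
    (hmem : ∀ p ∈ X, ∀ x ∈ p, x ∈ pv_S start)
    (hE : (X.filter (fun q => q.isEmpty)).length ≤ pv_E start)
    (hT : (X.map List.length).sum ≤ pv_T start) :
    pvNKey start (normalize_partition X) := by
  have hperm : (normalize_partition X).Perm (X.map (fun p => PySem.List.sorted p (fun y => y))) :=
    PySem.List.sorted_perm _ _ _
  have hmemq : ∀ m ∈ normalize_partition X, ∃ p ∈ X, m = PySem.List.sorted p (fun y => y) := by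
    intro m hm
    have := hperm.mem_iff.1 hm
    obtain ⟨p, hp, he⟩ := List.mem_map.1 this
    exact ⟨p, hp, he.symm⟩
  have hpartNodup : ∀ m ∈ normalize_partition X, m.Nodup ∧ List.Pairwise (· < ·) m := by
    intro m hm
    obtain ⟨p, hp, rfl⟩ := hmemq m hm
    have hnd' : (PySem.List.sorted p (fun y => y)).Nodup := (PySem.List.sorted_perm p _ _).nodup_iff.2 (hnd p hp)
    have hle : (PySem.List.sorted p (fun y => y)).Pairwise (· ≤ ·) := by
      have := PySem.List.sorted_pairwise p (fun y => y)
      simpa using this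
    exact ⟨hnd', pvPairwiseLt _ hle hnd'⟩
  have hmapId : (normalize_partition X).map (fun p => PySem.Set.ofList p) = normalize_partition X := by
    rw [List.map_congr_left (fun m hm => PySem.Set.ofList_eq_self_of_nodup m (hpartNodup m hm).1)]
    exact List.map_id _
  refine ⟨fun part hp => (hpartNodup part hp).2, ?_, ?_, ?_⟩
  · intro x hx
    obtain ⟨part, hp, hxp⟩ := List.mem_flatten.1 hx
    obtain ⟨p, hpX, rfl⟩ := hmemq part hp
    exact hmem p hpX x ((PySem.List.mem_sorted p _ _ x).1 hxp)
  · unfold pv_E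
    rw [hmapId]
    calc (List.filter (fun q => q.isEmpty) (normalize_partition X)).length
        = (normalize_partition X).countP (fun q => q.isEmpty) := List.countP_eq_length_filter.symm
      _ = (X.map (fun p => PySem.List.sorted p (fun y => y))).countP (fun q => q.isEmpty) := hperm.countP_eq _
      _ = X.countP ((fun q => q.isEmpty) ∘ (fun p => PySem.List.sorted p (fun y => y))) := List.countP_map
      _ = X.countP (fun q => q.isEmpty) := by
            apply List.countP_congr
            intro p _
            simp only [Function.comp_apply, List.isEmpty_iff]
            constructor
            · intro h; exact (PySem.List.sorted_eq_nil_iff p _ _).1 h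
            · intro h; exact (PySem.List.sorted_eq_nil_iff p _ _).2 h
      _ = (X.filter (fun q => q.isEmpty)).length := List.countP_eq_length_filter
      _ ≤ pv_E start := hE
  · unfold pv_T
    rw [hmapId]
    have h1 : ((normalize_partition X).map List.length).sum = ((X.map (fun p => PySem.List.sorted p (fun y => y))).map List.length).sum :=
      (hperm.map List.length).sum_eq
    rw [h1]
    have h2 : (X.map (fun p => PySem.List.sorted p (fun y => y))).map List.length = X.map List.length := by
      rw [List.map_map]
      apply List.map_congr_left
      intro p _
      simp only [Function.comp_apply]
      exact PySem.List.length_sorted p _ _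
    rw [h2]
    exact hT

lemma pvNB (n : Int) (adj : List (Int × List Int)) (vtm : List Int) (start K : List (List Int))
    (h : pvGood start K) : ∀ q ∈ find_neighbour_partitions n adj K vtm, pvNKey start q := by
  have hKE : pv_E K ≤ pv_E start := h.2.1
  have hKT : pv_T K ≤ pv_T start := h.2.2
  set parts : List (PySem.Set Int) := K.map (fun p => PySem.Set.ofList p) with hparts
  have hpN : ∀ p ∈ parts, p.Nodup := by
    intro p hp
    obtain ⟨pk, _, rfl⟩ := List.mem_map.1 hp
    exact PySem.Set.nodup_ofList pk
  have hpM : ∀ p ∈ parts, ∀ x ∈ p, x ∈ pv_S start := by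
    intro p hp x hx
    obtain ⟨pk, hpk, rfl⟩ := List.mem_map.1 hp
    exact h.1 x (List.mem_flatten.2 ⟨pk, hpk, (PySem.Set.mem_ofList pk x).1 hx⟩)
  have hEparts : (parts.filter (fun q => q.isEmpty)).length = pv_E K := rfl
  have hTparts : (parts.map List.length).sum = pv_T K := rfl
  have hstep : ∀ (nb : PySem.Set (List (List Int))) (v : Int), v ∈ vtm → (∀ q ∈ nb, pvNKey start q) →
      ∀ q ∈ pv_nbV adj parts nb v, pvNKey start q := by
    intro nb v _ hnb q hq
    unfold pv_nbV at hq
    cases hfi : parts.findIdx? (fun p => PySem.Set.contains p v) with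
    | none => rw [hfi] at hq; exact hnb q hq
    | some idx_v =>
      rw [hfi] at hq
      simp only at hq
      obtain ⟨hlt, hcont⟩ := pvFindIdx _ parts idx_v hfi
      have hvmem : v ∈ parts.getD idx_v [] := by simpa [PySem.Set.contains] using hcont
      have hpIdxmem : parts.getD idx_v [] ∈ parts := by
        rw [pvGetDElem parts idx_v hlt]
        exact List.getElem_mem hlt
      have hpIdxnd : (parts.getD idx_v []).Nodup := hpN _ hpIdxmem
      have hdisc := pvDiscardLen (parts.getD idx_v []) v hpIdxnd hvmem
      set np0 := parts.set idx_v (PySem.Set.discard (parts.getD idx_v []) v) with hnp0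
      have hnp0len : np0.length = parts.length := List.length_set ..
      have hnd0 : ∀ p ∈ np0, p.Nodup := by
        intro p hp
        rcases List.mem_or_eq_of_mem_set hp with hp | rfl
        · exact hpN p hp
        · exact List.Nodup.filter _ hpIdxnd
      have hm0 : ∀ p ∈ np0, ∀ x ∈ p, x ∈ pv_S start := by
        intro p hp x hx
        rcases List.mem_or_eq_of_mem_set hp with hp | rfl
        · exact hpM p hp x hx
        · exact hpM _ hpIdxmem x (List.mem_of_mem_filter hx)
      have hT0 : (np0.map List.length).sum + 1 = pv_T K := by
        have hsum := pvSetMapSum List.length parts idx_v (PySem.Set.discard (parts.getD idx_v []) v) hlt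
        rw [← hnp0] at hsum
        rw [hTparts] at hsum
        omega
      have hinner : ∀ q ∈ (PySem.List.enumerate parts).foldl
          (pv_nbMove (((PySem.Dict.mk adj).get? v).getD []) parts v idx_v) nb, pvNKey start q := by
        refine pvFoldPreserveMem (pvNKey start) (PySem.List.enumerate parts) _ ?_ _ (fun a ha => ha) nb hnb
        intro s ip hip hs q2 hq2
        obtain ⟨k, hk, rfl⟩ := (PySem.List.mem_enumerate_iff _ _ _).1 hip
        unfold pv_nbMove at hq2
        by_cases hc1 : ((0 + (k : Int), parts[k]).1 == (idx_v : Int))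
        · rw [if_pos hc1] at hq2; exact hs q2 hq2
        · rw [if_neg hc1] at hq2
          by_cases hc2 : (((PySem.Dict.mk adj).get? v).getD []).all (fun neigh => !(PySem.Set.contains (0 + (k : Int), parts[k]).2 neigh))
          · rw [if_pos hc2] at hq2
            simp only at hq2
            rcases (PySem.Set.mem_add _ _ _).1 hq2 with hq2 | rfl
            · exact hs q2 hq2
            · have hkTn : ((0 + (k : Int), parts[k]).1.toNat) = k := by simp
              rw [hkTn]
              have hklt : k < np0.length := by rw [hnp0len]; exact hk
              set np1 := np0.set k (PySem.Set.add (np0.getD k []) v) with hnp1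
              have hnd1 : ∀ p ∈ np1, p.Nodup := by
                intro p hp
                rcases List.mem_or_eq_of_mem_set hp with hp | rfl
                · exact hnd0 p hp
                · refine PySem.Set.nodup_add _ _ (hnd0 _ ?_)
                  rw [pvGetDElem np0 k hklt]
                  exact List.getElem_mem hklt
              have hm1 : ∀ p ∈ np1, ∀ x ∈ p, x ∈ pv_S start := by
                intro p hp x hx
                rcases List.mem_or_eq_of_mem_set hp with hp | rfl
                · exact hm0 p hp x hx
                · rcases (PySem.Set.mem_add _ _ _).1 hx with hx | rfl
                  · refine hm0 _ ?_ x hx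
                    rw [pvGetDElem np0 k hklt]
                    exact List.getElem_mem hklt
                  · exact hpM _ hpIdxmem x hvmem
              have hT1 : (np1.map List.length).sum ≤ pv_T K := by
                have hsum := pvSetMapSum List.length np0 k (PySem.Set.add (np0.getD k []) v) hklt
                rw [← hnp1] at hsum
                have hadd : (PySem.Set.add (np0.getD k []) v).length ≤ (np0.getD k []).length + 1 := by
                  unfold PySem.Set.add
                  split <;> simp
                omega
              apply pvNormalize_NKey start (np1.filter (fun q => !q.isEmpty))
              · intro p hp; exact hnd1 p (List.mem_of_mem_filter hp)
              · intro p hp; exact hm1 p (List.mem_of_mem_filter hp)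
              · have : (np1.filter (fun q => !q.isEmpty)).filter (fun q => q.isEmpty) = [] := by
                  apply List.filter_eq_nil_iff.2
                  intro a ha
                  have := List.of_mem_filter ha
                  simp only [Bool.not_eq_true'] at this
                  simp [this]
                rw [this]
                simp
              · calc ((np1.filter (fun q => !q.isEmpty)).map List.length).sum
                    ≤ (np1.map List.length).sum :=
                      List.Sublist.sum_le_sum (List.Sublist.map List.length (List.filter_sublist (l := np1))) (by intro x _; exact Nat.zero_le x)
                  _ ≤ pv_T K := hT1
                  _ ≤ pv_T start := hKT
          · rw [if_neg hc2] at hq2; exact hs q2 hq2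
      by_cases hg : ((1 : Int) < PySem.Set.len (parts.getD idx_v []))
      · rw [if_pos hg] at hq
        rcases (PySem.Set.mem_add _ _ _).1 hq with hq | rfl
        · exact hinner q hq
        · have hg2 : 2 ≤ (parts.getD idx_v []).length := by
            have : (1 : Int) < ((parts.getD idx_v []).length : Int) := by simpa [PySem.Set.len] using hg
            omega
          apply pvNormalize_NKey start (np0 ++ [[v]])
          · intro p hp
            rcases List.mem_append.1 hp with hp | hp
            · exact hnd0 p hp
            · simp at hp; subst hp; exact List.nodup_singleton v
          · intro p hp x hx
            rcases List.mem_append.1 hp with hp | hp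
            · exact hm0 p hp x hx
            · simp at hp; subst hp
              simp at hx; subst hx
              exact hpM _ hpIdxmem x hvmem
          · have hef : ((np0 ++ [[v]]).filter (fun q => q.isEmpty)).length = (np0.filter (fun q => q.isEmpty)).length := by
              rw [List.filter_append]
              simp
            rw [hef]
            have hE0 : (np0.filter (fun q => q.isEmpty)).length = (parts.filter (fun q => q.isEmpty)).length := by
              rw [pvFilterLenSum, pvFilterLenSum]
              have hsum := pvSetMapSum (fun q => if q.isEmpty then (1 : Nat) else 0) parts idx_v
                (PySem.Set.discard (parts.getD idx_v []) v) hlt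
              rw [← hnp0] at hsum
              have h1 : (if (parts.getD idx_v []).isEmpty then (1 : Nat) else 0) = 0 := by
                have hne : parts.getD idx_v [] ≠ [] := by
                  intro he; rw [he] at hvmem; cases hvmem
                simp only [List.isEmpty_iff]
                rw [if_neg hne]
              have h2 : (if (PySem.Set.discard (parts.getD idx_v []) v).isEmpty then (1 : Nat) else 0) = 0 := by
                have hlen : (PySem.Set.discard (parts.getD idx_v []) v).length ≠ 0 := by omega
                have hne : PySem.Set.discard (parts.getD idx_v []) v ≠ [] := by
                  intro he; rw [he] at hlen; simp at hlen
                simp only [List.isEmpty_iff]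
                rw [if_neg hne]
              simp only at hsum h1 h2
              omega
            rw [hE0, hEparts]
            exact hKE
          · have : ((np0 ++ [[v]]).map List.length).sum = (np0.map List.length).sum + 1 := by
              simp
            rw [this]
            omega
      · rw [if_neg hg] at hq
        exact hinner q hq
  rw [show find_neighbour_partitions n adj K vtm = vtm.foldl (pv_nbV adj parts) [] from rfl]
  exact pvFoldPreserveMem (pvNKey start) vtm (pv_nbV adj parts)
    (fun s a ha hs => hstep s a ha hs) vtm (fun a ha => ha) [] (by intro q hq; cases hq)

-- ---- the insertion fold ----

lemma pvFold_append (dep : Int) (ns : List (List (List Int))) (v : PySem.Dict (List (List Int)) Int) (q0 : List (List (List Int))) :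
    ns.foldl (pvF dep) (v, q0) = ((ns.foldl (pvF dep) (v, [])).1, q0 ++ (ns.foldl (pvF dep) (v, [])).2) := by
  induction ns generalizing v q0 with
  | nil => simp
  | cons p tl ih =>
    simp only [List.foldl_cons]
    by_cases hc : v.contains p
    · rw [show pvF dep (v, q0) p = (v, q0) from by simp [pvF, hc],
        show pvF dep (v, []) p = (v, []) from by simp [pvF, hc]]
      exact ih v q0
    · rw [show pvF dep (v, q0) p = (v.insert p dep, q0 ++ [p]) from by simp [pvF, hc],
        show pvF dep (v, []) p = (v.insert p dep, [p]) from by simp [pvF, hc]]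
      rw [ih (v.insert p dep) (q0 ++ [p]), ih (v.insert p dep) [p]]
      simp

lemma pvFold_spec (start : List (List Int)) (dep : Int) (ns : List (List (List Int))) (v : PySem.Dict (List (List Int)) Int)
    (hinv : pvInv start v) (hns : ∀ q ∈ ns, pvNKey start q) :
    (ns.foldl (pvF dep) (v, [])).1.keys = v.keys ++ (ns.foldl (pvF dep) (v, [])).2 ∧
    (∀ x ∈ v.keys, (ns.foldl (pvF dep) (v, [])).1.get? x = v.get? x) ∧
    (∀ x ∈ (ns.foldl (pvF dep) (v, [])).2, (ns.foldl (pvF dep) (v, [])).1.get? x = some dep ∧ pvNKey start x) ∧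
    pvInv start (ns.foldl (pvF dep) (v, [])).1 ∧
    (ns.foldl (pvF dep) (v, [])).1.size = v.size + (ns.foldl (pvF dep) (v, [])).2.length ∧
    (∀ q ∈ ns, q ∈ (ns.foldl (pvF dep) (v, [])).1.keys) := by
  induction ns generalizing v with
  | nil => exact ⟨by simp, fun x _ => rfl, by simp, hinv, by simp, by simp⟩
  | cons p tl ih =>
    simp only [List.foldl_cons]
    by_cases hc : v.contains p
    · rw [show pvF dep (v, []) p = (v, []) from by simp [pvF, hc]]
      obtain ⟨c1, c2, c3, c4, c5, c6⟩ := ih v hinv (fun q hq => hns q (List.mem_cons_of_mem _ hq))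
      refine ⟨c1, c2, c3, c4, c5, ?_⟩
      intro q hq
      rcases List.mem_cons.1 hq with rfl | hq
      · rw [c1]
        exact List.mem_append_left _ ((PySem.Dict.contains_iff_mem_keys v q).1 hc)
      · exact c6 q hq
    · rw [show pvF dep (v, []) p = (v.insert p dep, [p]) from by simp [pvF, hc]]
      rw [pvFold_append]
      have hcf : v.contains p = false := by simpa using hc
      have hpnot : p ∉ v.keys := fun hmem => hc ((PySem.Dict.contains_iff_mem_keys v p).2 hmem)
      have hkeys' : (v.insert p dep).keys = v.keys ++ [p] :=
        PySem.Dict.keys_insert_of_not_contains v dep hcf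
      have hpN : pvNKey start p := hns p (by simp)
      have hinv' : pvInv start (v.insert p dep) := by
        constructor
        · rw [hkeys']
          refine List.Nodup.append hinv.1 (List.nodup_singleton p) ?_
          intro a ha hb
          simp at hb
          subst hb
          exact hpnot ha
        · intro k hk
          rw [hkeys'] at hk
          rcases List.mem_append.1 hk with hk | hk
          · exact hinv.2 k hk
          · simp at hk; subst hk; exact Or.inr hpN
      obtain ⟨c1, c2, c3, c4, c5, c6⟩ := ih (v.insert p dep) hinv' (fun q hq => hns q (List.mem_cons_of_mem _ hq))
      have hold : ∀ x ∈ v.keys, (v.insert p dep).get? x = v.get? x := by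
        intro x hx
        exact PySem.Dict.get?_insert_of_ne v dep (fun he => hpnot (he ▸ hx))
      refine ⟨?_, ?_, ?_, c4, ?_, ?_⟩
      · rw [c1, hkeys']; simp
      · intro x hx
        rw [c2 x (by rw [hkeys']; exact List.mem_append_left _ hx), hold x hx]
      · intro x hx
        rcases List.mem_cons.1 hx with hx | hx
        · rw [hx]
          refine ⟨?_, hpN⟩
          rw [c2 p (by rw [hkeys']; simp)]
          exact PySem.Dict.get?_insert_self v p dep
        · exact c3 x hx
      · have hs' : (v.insert p dep).size = v.size + 1 := by
          rw [pvSizeKeys, pvSizeKeys, hkeys']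
          simp
        rw [c5, hs']
        simp
        omega
      · intro q hq
        rcases List.mem_cons.1 hq with rfl | hq
        · rw [c1, hkeys']
          exact List.mem_append_left _ (List.mem_append_right _ (by simp))
        · exact c6 q hq

lemma pvFoldNil (dep : Int) (ns : List (List (List Int))) : ∀ (v : PySem.Dict (List (List Int)) Int),
    (ns.foldl (pvF dep) (v, [])).2 = [] → (ns.foldl (pvF dep) (v, [])).1 = v := by
  induction ns with
  | nil => intro v _; rfl
  | cons p tl ih =>
    intro v h2
    simp only [List.foldl_cons] at h2 ⊢
    by_cases hc : v.contains p
    · rw [show pvF dep (v, []) p = (v, []) from by simp [pvF, hc]] at h2 ⊢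
      exact ih v h2
    · rw [show pvF dep (v, []) p = (v.insert p dep, [p]) from by simp [pvF, hc]] at h2
      rw [pvFold_append] at h2
      simp at h2

lemma pvLevel_append (n : Int) (adj : List (Int × List Int)) (vtm : List Int) (dep : Int)
    (L : List (List (List Int))) (v : PySem.Dict (List (List Int)) Int) (q0 : List (List (List Int))) :
    L.foldl (pvStep n adj vtm dep) (v, q0) = ((pv_bLevel n adj vtm dep v L).1, q0 ++ (pv_bLevel n adj vtm dep v L).2) := by
  induction L generalizing v q0 with
  | nil => simp [pv_bLevel]
  | cons c tl ih =>
    have e1 : pvStep n adj vtm dep (v, q0) c =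
        ((pvStep n adj vtm dep (v, []) c).1, q0 ++ (pvStep n adj vtm dep (v, []) c).2) := by
      unfold pvStep
      exact pvFold_append dep _ v q0
    simp only [pv_bLevel, List.foldl_cons]
    rw [e1, ih, ih]
    simp

lemma pvLevelNil (n : Int) (adj : List (Int × List Int)) (vtm : List Int) (dep : Int)
    (L : List (List (List Int))) : ∀ (v : PySem.Dict (List (List Int)) Int),
    (pv_bLevel n adj vtm dep v L).2 = [] → (pv_bLevel n adj vtm dep v L).1 = v := by
  induction L with
  | nil => intro v _; rfl
  | cons c tl ih =>
    intro v h2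
    have hWsplit : pv_bLevel n adj vtm dep v (c :: tl) =
        ((pv_bLevel n adj vtm dep (pvStep n adj vtm dep (v, []) c).1 tl).1,
          (pvStep n adj vtm dep (v, []) c).2 ++ (pv_bLevel n adj vtm dep (pvStep n adj vtm dep (v, []) c).1 tl).2) := by
      show (c :: tl).foldl (pvStep n adj vtm dep) (v, []) = _
      rw [List.foldl_cons]
      rw [show pvStep n adj vtm dep (v, []) c =
        ((pvStep n adj vtm dep (v, []) c).1, (pvStep n adj vtm dep (v, []) c).2) from rfl]
      exact pvLevel_append n adj vtm dep tl _ _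
    rw [hWsplit] at h2 ⊢
    simp only [List.append_eq_nil_iff] at h2
    have hA : (pvStep n adj vtm dep (v, []) c).1 = v := pvFoldNil dep _ v h2.1
    rw [hA] at h2 ⊢
    exact ih v h2.2

-- ---- one BFS level: A's queue processing of a whole level against the pvF level fold ----

lemma pvLevelA (n : Int) (adj : List (Int × List Int)) (vtm : List Int) (steps : Int) (start : List (List Int)) :
    ∀ (L : List (List (List Int))) (f : Nat) (v : PySem.Dict (List (List Int)) Int) (Nacc : List (List (List Int))) (dep : Int),
    (∀ x ∈ L, v.get? x = some dep ∧ pvGood start x) → pvInv start v → ¬ dep = steps → L.length ≤ f →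
    (pv_aLoop n adj vtm steps f v (L ++ Nacc) =
      pv_aLoop n adj vtm steps (f - L.length) (pv_bLevel n adj vtm (dep + 1) v L).1 (Nacc ++ (pv_bLevel n adj vtm (dep + 1) v L).2)) ∧
    (∀ x ∈ v.keys, (pv_bLevel n adj vtm (dep + 1) v L).1.get? x = v.get? x) ∧
    (∀ x ∈ (pv_bLevel n adj vtm (dep + 1) v L).2, (pv_bLevel n adj vtm (dep + 1) v L).1.get? x = some (dep + 1) ∧ pvNKey start x) ∧
    pvInv start (pv_bLevel n adj vtm (dep + 1) v L).1 ∧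
    (pv_bLevel n adj vtm (dep + 1) v L).1.size = v.size + (pv_bLevel n adj vtm (dep + 1) v L).2.length ∧
    (pv_bLevel n adj vtm (dep + 1) v L).1.keys = v.keys ++ (pv_bLevel n adj vtm (dep + 1) v L).2 ∧
    (∀ x ∈ L, ∀ q ∈ find_neighbour_partitions n adj x vtm, q ∈ (pv_bLevel n adj vtm (dep + 1) v L).1.keys) := by
  intro L
  induction L with
  | nil =>
    intro f v Nacc dep hL hinv hdep hf
    refine ⟨by simp [pv_bLevel], ?_, ?_, ?_, ?_, ?_, ?_⟩ <;> simp [pv_bLevel, hinv]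
  | cons c tl ih =>
    intro f v Nacc dep hL hinv hdep hf
    cases f with
    | zero => simp at hf
    | succ f' =>
      have hgc := hL c (by simp)
      have hd : v.getD c 0 = dep := PySem.Dict.getD_of_get?_eq_some v 0 hgc.1
      have hbeq : (dep == steps) = false := by simpa using hdep
      have hns : ∀ q ∈ find_neighbour_partitions n adj c vtm, pvNKey start q :=
        pvNB n adj vtm start c hgc.2
      obtain ⟨s1, s2, s3, s4, s5, s6⟩ := pvFold_spec start (dep + 1) (find_neighbour_partitions n adj c vtm) v hinv hns
      have hstep1 : pv_aLoop n adj vtm steps (f' + 1) v ((c :: tl) ++ Nacc) =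
          pv_aLoop n adj vtm steps f'
            ((find_neighbour_partitions n adj c vtm).foldl (pvF (dep + 1)) (v, [])).1
            ((tl ++ Nacc) ++ ((find_neighbour_partitions n adj c vtm).foldl (pvF (dep + 1)) (v, [])).2) := by
        show pv_aLoop n adj vtm steps (f' + 1) v (c :: (tl ++ Nacc)) = _
        rw [show pv_aLoop n adj vtm steps (f' + 1) v (c :: (tl ++ Nacc)) =
            (if (v.getD c 0 == steps) = true then pv_aLoop n adj vtm steps f' v (tl ++ Nacc)
             else pv_aLoop n adj vtm steps f'
               ((find_neighbour_partitions n adj c vtm).foldl (pvF (v.getD c 0 + 1)) (v, tl ++ Nacc)).1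
               ((find_neighbour_partitions n adj c vtm).foldl (pvF (v.getD c 0 + 1)) (v, tl ++ Nacc)).2) from rfl]
        rw [hd, hbeq]
        simp only [Bool.false_eq_true, if_false]
        rw [pvFold_append]
      set A1 := ((find_neighbour_partitions n adj c vtm).foldl (pvF (dep + 1)) (v, [])).1 with hA1
      set N1 := ((find_neighbour_partitions n adj c vtm).foldl (pvF (dep + 1)) (v, [])).2 with hN1
      have hmemA1 : ∀ x ∈ v.keys, x ∈ A1.keys := by
        intro x hx; rw [s1]; exact List.mem_append_left _ hx
      have hmemKeys : ∀ (x : List (List Int)) (d0 : Int), v.get? x = some d0 → x ∈ v.keys := by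
        intro x d0 hx
        by_contra hnx
        rw [(PySem.Dict.get?_eq_none_iff_not_mem_keys v x).2 hnx] at hx
        cases hx
      have hL' : ∀ x ∈ tl, A1.get? x = some dep ∧ pvGood start x := by
        intro x hx
        have h0 := hL x (by simp [hx])
        exact ⟨by rw [s2 x (hmemKeys x dep h0.1)]; exact h0.1, h0.2⟩
      obtain ⟨ih1, ih2, ih3, ih4, ih5, ih6, ih7⟩ := ih f' A1 (Nacc ++ N1) dep hL' s4 hdep (by simp at hf; omega)
      have hWsplit : pv_bLevel n adj vtm (dep + 1) v (c :: tl) =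
          ((pv_bLevel n adj vtm (dep + 1) A1 tl).1, N1 ++ (pv_bLevel n adj vtm (dep + 1) A1 tl).2) := by
        show (c :: tl).foldl (pvStep n adj vtm (dep + 1)) (v, []) = _
        rw [List.foldl_cons]
        rw [show pvStep n adj vtm (dep + 1) (v, []) c = (A1, N1) from rfl]
        exact pvLevel_append n adj vtm (dep + 1) tl A1 N1
      set W' := pv_bLevel n adj vtm (dep + 1) A1 tl with hW'
      have hmemA1' : ∀ (x : List (List Int)) (d0 : Int), A1.get? x = some d0 → x ∈ A1.keys := by
        intro x d0 hx
        by_contra hnx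
        rw [(PySem.Dict.get?_eq_none_iff_not_mem_keys A1 x).2 hnx] at hx
        cases hx
      refine ⟨?_, ?_, ?_, ?_, ?_, ?_, ?_⟩
      · rw [hstep1]
        rw [show (tl ++ Nacc) ++ N1 = tl ++ (Nacc ++ N1) from by simp]
        rw [ih1, hWsplit]
        simp only [List.length_cons]
        rw [show f' + 1 - (tl.length + 1) = f' - tl.length from by omega]
        rw [show (Nacc ++ N1) ++ W'.2 = Nacc ++ (N1 ++ W'.2) from by simp]
      · intro x hx
        rw [hWsplit]
        rw [ih2 x (hmemA1 x hx), s2 x hx]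
      · intro x hx
        rw [hWsplit] at hx ⊢
        simp only at hx
        rcases List.mem_append.1 hx with hx | hx
        · have h3 := s3 x hx
          exact ⟨by rw [ih2 x (hmemA1' x (dep + 1) h3.1)]; exact h3.1, h3.2⟩
        · exact ih3 x hx
      · rw [hWsplit]; exact ih4
      · rw [hWsplit]
        simp only [List.length_append]
        rw [ih5, s5]
        omega
      · rw [hWsplit]
        simp only
        rw [ih6, s1]
        simp
      · intro x hx q hq
        rcases List.mem_cons.1 hx with rfl | hx
        · rw [hWsplit]
          simp only
          rw [ih6]
          exact List.mem_append_left _ (s6 q hq)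
        · rw [hWsplit]
          simp only
          exact ih7 x hx q hq

lemma pvLevelSteps (n : Int) (adj : List (Int × List Int)) (vtm : List Int) (steps : Int) :
    ∀ (L : List (List (List Int))) (f : Nat) (v : PySem.Dict (List (List Int)) Int),
    (∀ x ∈ L, v.get? x = some steps) → L.length ≤ f →
    pv_aLoop n adj vtm steps f v L = v := by
  intro L
  induction L with
  | nil => intro f v _ _; cases f <;> simp [pv_aLoop]
  | cons c tl ih =>
    intro f v hL hf
    cases f with
    | zero => simp at hf
    | succ f' =>
      have hd : v.getD c 0 = steps := PySem.Dict.getD_of_get?_eq_some v 0 (hL c (by simp))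
      simp only [pv_aLoop, hd, beq_self_eq_true, if_true]
      exact ih f' v (fun x hx => hL x (List.mem_cons_of_mem _ hx)) (by simp at hf; omega)

-- ---- relating B's grew-flag fold to the pvF fold ----

lemma pvGF (dep : Int) (ns : List (List (List Int))) : ∀ (v : PySem.Dict (List (List Int)) Int) (g : Bool),
    ns.foldl (pvG dep) (v, g) = ((ns.foldl (pvF dep) (v, [])).1, g || !(ns.foldl (pvF dep) (v, [])).2.isEmpty) := by
  induction ns with
  | nil => intro v g; simp
  | cons p tl ih =>
    intro v g
    simp only [List.foldl_cons]
    by_cases hc : v.contains p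
    · rw [show pvG dep (v, g) p = (v, g) from by simp [pvG, hc],
        show pvF dep (v, []) p = (v, []) from by simp [pvF, hc]]
      exact ih v g
    · rw [show pvG dep (v, g) p = (v.insert p dep, true) from by simp [pvG, hc],
        show pvF dep (v, []) p = (v.insert p dep, [p]) from by simp [pvF, hc]]
      rw [ih (v.insert p dep) true, pvFold_append dep tl (v.insert p dep) [p]]
      simp

lemma pvGid (dep : Int) (ns : List (List (List Int))) : ∀ (v : PySem.Dict (List (List Int)) Int) (g : Bool),
    (∀ q ∈ ns, v.contains q = true) → ns.foldl (pvG dep) (v, g) = (v, g) := by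
  induction ns with
  | nil => intro v g _; rfl
  | cons p tl ih =>
    intro v g h
    simp only [List.foldl_cons]
    rw [show pvG dep (v, g) p = (v, g) from by simp [pvG, h p (by simp)]]
    exact ih v g (fun q hq => h q (List.mem_cons_of_mem _ hq))

lemma pvRoundP (n : Int) (adj : List (Int × List Int)) (vtm : List Int) (dep : Int)
    (P : List (List (List Int))) (v : PySem.Dict (List (List Int)) Int) (g : Bool)
    (hP : ∀ x ∈ P, ∀ q ∈ find_neighbour_partitions n adj x vtm, q ∈ v.keys) :
    P.foldl (pvBStep n adj vtm dep) (v, g) = (v, g) := by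
  induction P with
  | nil => rfl
  | cons x tl ih =>
    simp only [List.foldl_cons]
    rw [show pvBStep n adj vtm dep (v, g) x = (v, g) from
      pvGid dep _ v g (fun q hq => (PySem.Dict.contains_iff_mem_keys v q).2 (hP x (by simp) q hq))]
    exact ih (fun y hy => hP y (List.mem_cons_of_mem _ hy))

lemma pvRoundL (n : Int) (adj : List (Int × List Int)) (vtm : List Int) (dep : Int)
    (L : List (List (List Int))) : ∀ (v : PySem.Dict (List (List Int)) Int) (g : Bool),
    L.foldl (pvBStep n adj vtm dep) (v, g) = ((pv_bLevel n adj vtm dep v L).1, g || !(pv_bLevel n adj vtm dep v L).2.isEmpty) := by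
  induction L with
  | nil => intro v g; simp [pv_bLevel]
  | cons c tl ih =>
    intro v g
    simp only [List.foldl_cons]
    rw [show pvBStep n adj vtm dep (v, g) c =
      ((pvStep n adj vtm dep (v, []) c).1, g || !(pvStep n adj vtm dep (v, []) c).2.isEmpty) from
      pvGF dep _ v g]
    rw [ih]
    have hWsplit : pv_bLevel n adj vtm dep v (c :: tl) =
        ((pv_bLevel n adj vtm dep (pvStep n adj vtm dep (v, []) c).1 tl).1,
          (pvStep n adj vtm dep (v, []) c).2 ++ (pv_bLevel n adj vtm dep (pvStep n adj vtm dep (v, []) c).1 tl).2) := by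
      show (c :: tl).foldl (pvStep n adj vtm dep) (v, []) = _
      rw [List.foldl_cons]
      rw [show pvStep n adj vtm dep (v, []) c =
        ((pvStep n adj vtm dep (v, []) c).1, (pvStep n adj vtm dep (v, []) c).2) from rfl]
      exact pvLevel_append n adj vtm dep tl _ _
    rw [hWsplit]
    congr 1
    cases hs2 : (pvStep n adj vtm dep (v, []) c).2 with
    | nil => simp
    | cons a t => simp

-- ---- the main loop correspondence ----

lemma pvAB (n : Int) (adj : List (Int × List Int)) (vtm : List Int) (steps : Int) (start : List (List Int)) :
    ∀ (fB : Nat), ∀ (fA : Nat) (dep : Int) (v : PySem.Dict (List (List Int)) Int) (P L : List (List (List Int))),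
    v.keys = P ++ L →
    (∀ x ∈ P, ∀ q ∈ find_neighbour_partitions n adj x vtm, q ∈ v.keys) →
    (∀ x ∈ L, v.get? x = some dep ∧ pvGood start x) →
    pvInv start v →
    L.length + (pv_U start + 1 - v.size) ≤ fA →
    pv_U start + 1 - v.size + 1 ≤ fB →
    pv_aLoop n adj vtm steps fA v L = pv_bLoop n adj vtm steps fB dep v := by
  intro fB
  induction fB with
  | zero => intro fA dep v P L _ _ _ _ _ hfB; omega
  | succ f ihf =>
    intro fA dep v P L hkeys hP hL hinv hfA hfB
    by_cases hdep : dep = steps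
    · have hb : pv_bLoop n adj vtm steps (f + 1) dep v = v := by
        simp [pv_bLoop, hdep]
      rw [hb]
      exact pvLevelSteps n adj vtm steps L fA v (fun x hx => hdep ▸ (hL x hx).1) (by omega)
    · have hbe : (dep == steps) = false := by simpa using hdep
      set W := pv_bLevel n adj vtm (dep + 1) v L with hW
      have hround : pv_bRound n adj vtm (dep + 1) v = (W.1, !W.2.isEmpty) := by
        unfold pv_bRound
        rw [hkeys, List.foldl_append]
        rw [pvRoundP n adj vtm (dep + 1) P v false hP]
        rw [pvRoundL n adj vtm (dep + 1) L v false]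
        simp [hW]
      have hb : pv_bLoop n adj vtm steps (f + 1) dep v =
          (if (!W.2.isEmpty) then pv_bLoop n adj vtm steps f (dep + 1) W.1 else W.1) := by
        show (if (dep == steps) = true then v else
          (if (pv_bRound n adj vtm (dep + 1) v).2 then
            pv_bLoop n adj vtm steps f (dep + 1) (pv_bRound n adj vtm (dep + 1) v).1
          else (pv_bRound n adj vtm (dep + 1) v).1)) = _
        rw [hbe, hround]
        simp
      obtain ⟨e, o2, o3, o4, o5, o6, o7⟩ :=
        pvLevelA n adj vtm steps start L fA v [] dep hL hinv hdep (by omega)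
      rw [← hW] at e o2 o3 o4 o5 o6 o7
      simp only [List.append_nil, List.nil_append] at e
      rw [hb, e]
      by_cases hE : W.2.isEmpty
      · rw [if_neg (by simp [hE])]
        have h2e : W.2 = [] := List.isEmpty_iff.1 hE
        have h1e : W.1 = v := pvLevelNil n adj vtm (dep + 1) L v h2e
        rw [h2e, h1e]
        cases (fA - L.length) <;> simp [pv_aLoop]
      · rw [if_pos (by simp [hE])]
        have h2ne : W.2 ≠ [] := fun h => hE (by simp [h])
        have h2len : 1 ≤ W.2.length := List.length_pos_of_ne_nil h2ne
        have hsize := pvSize_le start W.1 o4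
        refine ihf (fA - L.length) (dep + 1) W.1 (P ++ L) W.2 ?_ ?_ ?_ o4 ?_ ?_
        · rw [o6, hkeys, List.append_assoc]
        · intro x hx q hq
          rcases List.mem_append.1 hx with hx | hx
          · rw [o6]
            exact List.mem_append_left _ (hP x hx q hq)
          · exact o7 x hx q hq
        · intro x hx
          exact ⟨(o3 x hx).1, (o3 x hx).2.2⟩
        · omega
        · omega

-- ===== VERDICT (by name: the statement is the Claim_ definition above) =====
theorem find_partitions_within_steps_spec : Claim_equal_find_partitions_within_steps := by
  unfold Claim_equal_find_partitions_within_steps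
  intro n adj start_partition vertices_to_move steps _ _
  unfold Spec_find_partitions_within_steps
  unfold find_partitions_within_steps find_partitions_within_steps_alt
  have hmain : pv_aLoop n adj vertices_to_move steps (pv_fuel start_partition)
        (PySem.Dict.mk [(start_partition, (0 : Int))]) [start_partition] =
      pv_bLoop n adj vertices_to_move steps (pv_fuel start_partition) 0
        (PySem.Dict.mk [(start_partition, (0 : Int))]) := by
    apply pvAB n adj vertices_to_move steps start_partition (pv_fuel start_partition)
      (pv_fuel start_partition) 0 (PySem.Dict.mk [(start_partition, (0 : Int))]) [] [start_partition]
    · rfl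
    · intro x hx; cases hx
    · intro x hx
      simp only [List.mem_singleton] at hx
      subst hx
      refine ⟨by simp [PySem.Dict.get?_mk_cons], ?_, le_rfl, le_rfl⟩
      intro y hy
      exact (PySem.Set.mem_ofList _ _).2 hy
    · constructor
      · simp
      · intro k hk
        simp at hk
        exact Or.inl hk
    · have hsz : (PySem.Dict.mk [(start_partition, (0 : Int))]).size = 1 := rfl
      rw [hsz]
      unfold pv_fuel
      simp only [List.length_singleton]
      omega
    · have hsz : (PySem.Dict.mk [(start_partition, (0 : Int))]).size = 1 := rfl
      rw [hsz]
      unfold pv_fuel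
      omega
  rw [hmain]
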